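-- pv_equiv track=rewrite | github.com/sordhlm/Kiwi_optimization | tcms/report/views.py | calReportData
-- ===== SOURCE A (Python) =====
-- def calReportData(tclist):
--     #{'id': 6, 'name': 'BLOCKED'},
--     #{'id': 7, 'name': 'ERROR'},
--     #{'id': 5, 'name': 'FAILED'},
--     #{'id': 1, 'name': 'IDLE'},
--     #{'id': 4, 'name': 'PASSED'},
--     #{'id': 3, 'name': 'PAUSED'},
--     #{'id': 2, 'name': 'RUNNING'},
--     #{'id': 8, 'name': 'WAIVED'}
--     length = len(tclist)-1
--     exist_tc = {}
--     pass_cnt = 0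
--     fail_cnt = 0
--     block_cnt = 0
--
--     for i in range(length,-1,-1):
--         if(tclist[i]['case_id'] not in exist_tc):
--             if tclist[i]['case_run_status_id'] == 6:
--                 block_cnt += 1
--                 exist_tc[tclist[i]['case_id']] = 1
--             elif tclist[i]['case_run_status_id'] == 5:
--                 fail_cnt += 1
--                 exist_tc[tclist[i]['case_id']] = 1
--             elif tclist[i]['case_run_status_id'] == 4:
--                 pass_cnt += 1
--                 exist_tc[tclist[i]['case_id']] = 1
--     return {'PASSED':pass_cnt,'FAILED':fail_cnt,'BLOCKED':block_cnt}
-- ===== SOURCE B (Python) =====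
-- def calReportData(tclist):
--     # Build a per-case "latest qualifying status" table in one forward pass
--     # (last write wins = A's reverse first-seen), then tally it.
--     latest = {}
--     for tc in tclist:
--         s = tc['case_run_status_id']
--         if s in (4, 5, 6):
--             latest[tc['case_id']] = s
--     vals = list(latest.values())
--     return {'PASSED': vals.count(4), 'FAILED': vals.count(5), 'BLOCKED': vals.count(6)}
-- ===== Notes on version B (the rewrite author's own statement) =====
-- stated objective: simpler
-- what changed: Replaces the reverse index scan with inline first-seen counting by a forward pass that builds a per-case latest-qualifying-status dict (last write wins) followed by a separate tally of its values.
import Mathlib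
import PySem

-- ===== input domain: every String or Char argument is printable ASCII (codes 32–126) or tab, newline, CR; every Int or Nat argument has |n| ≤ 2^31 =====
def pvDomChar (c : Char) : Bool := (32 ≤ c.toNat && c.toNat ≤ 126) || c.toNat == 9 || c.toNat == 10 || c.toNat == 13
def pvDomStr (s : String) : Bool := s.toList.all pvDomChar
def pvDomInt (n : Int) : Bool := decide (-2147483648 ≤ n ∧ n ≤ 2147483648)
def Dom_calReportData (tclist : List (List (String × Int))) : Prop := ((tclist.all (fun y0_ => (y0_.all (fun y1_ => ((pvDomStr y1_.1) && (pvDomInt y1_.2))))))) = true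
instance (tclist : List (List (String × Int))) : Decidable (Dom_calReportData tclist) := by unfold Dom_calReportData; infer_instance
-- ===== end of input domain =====

-- B builds a per-case latest-qualifying-status dict in one forward pass and tallies it afterwards,
-- instead of A's reverse index scan that counts inline on first sight of a case (objective: simpler).

-- ===== PORT A =====
-- loop body of A's reverse scan: state = (exist_tc, pass_cnt, fail_cnt, block_cnt)
def pvStepA (st : PySem.Dict Int Int × Int × Int × Int) (row : List (String × Int)) :
    PySem.Dict Int Int × Int × Int × Int :=
  match (PySem.Dict.mk row).get? "case_id" with
  | none => st            -- Python: KeyError (excluded by Pre_)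
  | some c =>
    if st.1.contains c then st
    else
      match (PySem.Dict.mk row).get? "case_run_status_id" with
      | none => st        -- Python: KeyError (excluded by Pre_)
      | some s =>
        if s = 6 then (st.1.insert c 1, st.2.1, st.2.2.1, st.2.2.2 + 1)
        else if s = 5 then (st.1.insert c 1, st.2.1, st.2.2.1 + 1, st.2.2.2)
        else if s = 4 then (st.1.insert c 1, st.2.1 + 1, st.2.2.1, st.2.2.2)
        else st

def calReportData (tclist : List (List (String × Int))) : List (String × Int) :=
  let length : Int := PySem.List.len tclist - 1
  let st := (PySem.List.pyRange length (-1) (-1)).foldl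
      (fun st i => pvStepA st (PySem.List.pyGetD tclist i [])) (PySem.Dict.empty, 0, 0, 0)
  [("PASSED", st.2.1), ("FAILED", st.2.2.1), ("BLOCKED", st.2.2.2)]

-- ===== PORT B =====
-- loop body of B's forward pass: latest[case_id] = status for qualifying statuses
def pvStepB (latest : PySem.Dict Int Int) (row : List (String × Int)) : PySem.Dict Int Int :=
  match (PySem.Dict.mk row).get? "case_run_status_id" with
  | none => latest        -- Python: KeyError (excluded by Pre_)
  | some s =>
    if s = 4 ∨ s = 5 ∨ s = 6 then
      match (PySem.Dict.mk row).get? "case_id" with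
      | none => latest    -- Python: KeyError (excluded by Pre_)
      | some c => latest.insert c s
    else latest

def calReportData_alt (tclist : List (List (String × Int))) : List (String × Int) :=
  let latest := tclist.foldl pvStepB PySem.Dict.empty
  let vals := latest.values
  [("PASSED", (PySem.List.count vals 4 : Int)),
   ("FAILED", (PySem.List.count vals 5 : Int)),
   ("BLOCKED", (PySem.List.count vals 6 : Int))]

-- ===== PRECONDITION & SPEC =====
-- Pre_ requires every row to carry both the 'case_id' and 'case_run_status_id' keys: A raises
-- KeyError on a missing key except when the row's case was already counted from a later row (an
-- order-dependent accident of the reverse scan), and B's forward pass raises KeyError there too.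
def Pre_calReportData (tclist : List (List (String × Int))) : Prop :=
  ∀ row ∈ tclist, ((PySem.Dict.mk row).get? "case_id").isSome = true ∧
    ((PySem.Dict.mk row).get? "case_run_status_id").isSome = true
instance (tclist : List (List (String × Int))) : Decidable (Pre_calReportData tclist) := by
  unfold Pre_calReportData; infer_instance

def pvWitness_calReportData : (List (List (String × Int))) :=
  [[("case_id", 1), ("case_run_status_id", 4)], [("case_id", 2), ("case_run_status_id", 6)]]

def Spec_calReportData (tclist : List (List (String × Int))) (out : List (String × Int)) : Prop :=
  out = calReportData_alt tclist
instance (tclist : List (List (String × Int))) (out : List (String × Int)) :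
    Decidable (Spec_calReportData tclist out) := by unfold Spec_calReportData; infer_instance

-- ===== CLAIM (what is proved, stated in full; the proofs are below) =====
def Claim_equal_calReportData : Prop := ∀ (tclist : List (List (String × Int))),
  Dom_calReportData tclist → Pre_calReportData tclist →
    Spec_calReportData tclist (calReportData tclist)

-- ===== LEMMAS AND PROOFS =====

-- the per-case latest-qualifying-status table of a list of rows, head row = most recent
def pvLatest : List (List (String × Int)) → PySem.Dict Int Int
  | [] => PySem.Dict.empty
  | row :: R => pvStepB (pvLatest R) row

-- B's forward fold computes pvLatest of the reversed list
lemma pvFoldB_eq (L : List (List (String × Int))) :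
    L.foldl pvStepB PySem.Dict.empty = pvLatest L.reverse := by
  induction L using List.reverseRecOn with
  | nil => rfl
  | append_singleton L d ih =>
      rw [List.foldl_append, List.reverse_append]
      simp [pvLatest, ih]

lemma pvLatest_nodup (R : List (List (String × Int))) : (pvLatest R).keys.Nodup := by
  induction R with
  | nil => exact PySem.Dict.nodup_keys_empty
  | cons row R ih =>
      simp only [pvLatest, pvStepB]
      cases (PySem.Dict.mk row).get? "case_run_status_id" with
      | none => exact ih
      | some s =>
          by_cases hq : s = 4 ∨ s = 5 ∨ s = 6
          · simp only [if_pos hq]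
            cases (PySem.Dict.mk row).get? "case_id" with
            | none => exact ih
            | some c => exact PySem.Dict.nodup_keys_insert _ _ _ ih
          · simp only [if_neg hq]; exact ih

-- number of entries of D whose key the reverse scan has not yet counted and whose value is v
def pvTally (D seen : PySem.Dict Int Int) (v : Int) : Int :=
  (((D.items.filter (fun q => !seen.contains q.1)).map (·.2)).count v : Int)

lemma pv_filter_map_repl (l : List (Int × Int)) (c s : Int) (seen : PySem.Dict Int Int)
    (hc : seen.contains c = true) :
    (l.map (fun p => if p.1 == c then (c, s) else p)).filter (fun q => !seen.contains q.1)
      = l.filter (fun q => !seen.contains q.1) := by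
  induction l with
  | nil => rfl
  | cons q l ih =>
      rw [List.map_cons]
      by_cases h : q.1 = c
      · rw [if_pos (by simp [h]), List.filter_cons, List.filter_cons,
          if_neg (by simp [hc]), if_neg (by simp [h, hc])]
        exact ih
      · rw [if_neg (by simp [h]), List.filter_cons, List.filter_cons, ih]

lemma pvTally_skip (D seen : PySem.Dict Int Int) (c s v : Int)
    (hc : seen.contains c = true) :
    pvTally (D.insert c s) seen v = pvTally D seen v := by
  unfold pvTally
  by_cases hd : D.contains c = true
  · rw [PySem.Dict.items_insert_of_contains D s hd, pv_filter_map_repl _ _ _ _ hc]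
  · rw [PySem.Dict.items_insert_of_not_contains D s (by simpa using hd)]
    simp [List.filter_append, hc]

lemma pv_filter_insert_seen (l : List (Int × Int)) (c : Int) (seen : PySem.Dict Int Int)
    (hl : ∀ q ∈ l, q.1 ≠ c) :
    l.filter (fun q => !(seen.insert c (1:Int)).contains q.1)
      = l.filter (fun q => !seen.contains q.1) := by
  apply List.filter_congr
  intro q hq
  rw [PySem.Dict.contains_insert]
  simp [hl q hq]

lemma pv_count_repl (l : List (Int × Int)) (c s v : Int) (seen : PySem.Dict Int Int)
    (hc : seen.contains c = false)
    (hn : (l.map (·.1)).Nodup) (hm : c ∈ l.map (·.1)) :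
    (((l.map (fun p => if p.1 == c then (c, s) else p)).filter
        (fun q => !seen.contains q.1)).map (·.2)).count v
      = (if v = s then 1 else 0)
        + ((l.filter (fun q => !(seen.insert c (1:Int)).contains q.1)).map (·.2)).count v := by
  induction l with
  | nil => simp at hm
  | cons q l ih =>
      rw [List.map_cons] at hn hm
      by_cases h : q.1 = c
      · have hl : ∀ p ∈ l, p.1 ≠ c := by
          intro p hp hpc
          apply (List.nodup_cons.1 hn).1
          rw [h, ← hpc]
          exact List.mem_map_of_mem hp
        have hrepl : l.map (fun p : Int × Int => if p.1 == c then (c, s) else p) = l := by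
          rw [List.map_congr_left (g := id) (fun p hp => by simp [hl p hp]), List.map_id]
        have hhead : (if (q.1 == c) = true then ((c, s) : Int × Int) else q) = (c, s) := by
          simp [h]
        rw [List.map_cons, hhead, hrepl,
          List.filter_cons_of_pos (by simp [hc]),
          List.filter_cons_of_neg (by rw [h, PySem.Dict.contains_insert]; simp),
          pv_filter_insert_seen l c seen hl, List.map_cons, List.count_cons]
        by_cases hv : v = s
        · subst hv; simp; omega
        · simp [hv, show ¬ s = v from fun hh => hv hh.symm]
      · have hm' : c ∈ l.map (·.1) := by
          rcases List.mem_cons.1 hm with h1 | h1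
          · exact absurd h1.symm h
          · exact h1
        have ih' := ih (List.nodup_cons.1 hn).2 hm'
        have hhead : (if (q.1 == c) = true then ((c, s) : Int × Int) else q) = q := by
          simp [h]
        have hpred : (!(seen.insert c (1:Int)).contains q.1) = (!seen.contains q.1) := by
          rw [PySem.Dict.contains_insert]; simp [h]
        rw [List.map_cons, hhead]
        by_cases hk : (!seen.contains q.1) = true
        · simp only [List.filter_cons, hpred, hk, if_true, List.map_cons, List.count_cons, ih']
          omega
        · have hk' : (!seen.contains q.1) = false := by simpa using hk
          simp only [List.filter_cons, hpred, hk', Bool.false_eq_true, if_false]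
          exact ih'

lemma pvTally_new (D seen : PySem.Dict Int Int) (c s v : Int)
    (hnd : D.keys.Nodup) (hc : seen.contains c = false) :
    pvTally (D.insert c s) seen v
      = (if v = s then 1 else 0) + pvTally D (seen.insert c 1) v := by
  unfold pvTally
  by_cases hd : D.contains c = true
  · have hm : c ∈ D.items.map (·.1) := (PySem.Dict.contains_iff_mem_keys D c).1 hd
    have hn : (D.items.map (·.1)).Nodup := hnd
    rw [PySem.Dict.items_insert_of_contains D s hd]
    have h2 := pv_count_repl D.items c s v seen hc hn hm
    by_cases hv : v = s <;> simp only [hv, if_true, if_false] at h2 ⊢ <;> omega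
  · have hd' : D.contains c = false := by simpa using hd
    have hl : ∀ q ∈ D.items, q.1 ≠ c := by
      intro q hq hqc
      exact hd ((PySem.Dict.contains_iff_mem_keys D c).2 (hqc ▸ List.mem_map_of_mem hq))
    rw [PySem.Dict.items_insert_of_not_contains D s hd', List.filter_append,
      pv_filter_insert_seen D.items c seen hl,
      List.filter_cons_of_pos (by simp [hc]), List.map_append, List.count_append]
    by_cases hv : v = s
    · subst hv; simp; omega
    · simp [hv, show ¬ s = v from fun hh => hv hh.symm]

lemma pvTally_empty (D : PySem.Dict Int Int) (v : Int) :
    pvTally D PySem.Dict.empty v = (D.values.count v : Int) := by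
  simp [pvTally, PySem.Dict.contains_empty, PySem.Dict.values]

lemma pvFoldA_eq (R : List (List (String × Int)))
    (hk : ∀ row ∈ R, ((PySem.Dict.mk row).get? "case_id").isSome = true ∧
      ((PySem.Dict.mk row).get? "case_run_status_id").isSome = true) :
    ∀ (seen : PySem.Dict Int Int) (p f b : Int),
      ∃ t, R.foldl pvStepA (seen, p, f, b)
        = (t, p + pvTally (pvLatest R) seen 4,
              f + pvTally (pvLatest R) seen 5,
              b + pvTally (pvLatest R) seen 6) := by
  induction R with
  | nil =>
      intro seen p f b
      exact ⟨seen, by simp [pvLatest, pvTally]⟩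
  | cons row R ih =>
      intro seen p f b
      obtain ⟨hc, hs⟩ := hk row (List.mem_cons_self)
      have hk' : ∀ r ∈ R, ((PySem.Dict.mk r).get? "case_id").isSome = true ∧
          ((PySem.Dict.mk r).get? "case_run_status_id").isSome = true :=
        fun r hr => hk r (List.mem_cons_of_mem _ hr)
      obtain ⟨c, hcid⟩ := Option.isSome_iff_exists.1 hc
      obtain ⟨s, hsts⟩ := Option.isSome_iff_exists.1 hs
      rw [List.foldl_cons]
      by_cases hseen : seen.contains c = true
      · have hstep : pvStepA (seen, p, f, b) row = (seen, p, f, b) := by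
          simp [pvStepA, hcid, hseen]
        rw [hstep]
        obtain ⟨t, ht⟩ := ih hk' seen p f b
        refine ⟨t, ?_⟩
        rw [ht]
        have hT : ∀ v, pvTally (pvLatest (row :: R)) seen v = pvTally (pvLatest R) seen v := by
          intro v
          simp only [pvLatest, pvStepB, hsts, hcid]
          by_cases hq : s = 4 ∨ s = 5 ∨ s = 6
          · simp only [if_pos hq]
            exact pvTally_skip _ _ _ _ _ hseen
          · simp only [if_neg hq]
        rw [hT 4, hT 5, hT 6]
      · have hseen' : seen.contains c = false := by simpa using hseen
        have hnd := pvLatest_nodup R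
        by_cases h6 : s = 6
        · subst h6
          have hstep : pvStepA (seen, p, f, b) row = (seen.insert c 1, p, f, b + 1) := by
            simp [pvStepA, hcid, hsts, hseen']
          have hL : pvLatest (row :: R) = (pvLatest R).insert c 6 := by
            simp [pvLatest, pvStepB, hsts, hcid]
          rw [hstep]
          obtain ⟨t, ht⟩ := ih hk' (seen.insert c 1) p f (b + 1)
          refine ⟨t, ?_⟩
          rw [ht, hL, pvTally_new _ _ _ _ 4 hnd hseen', pvTally_new _ _ _ _ 5 hnd hseen',
            pvTally_new _ _ _ _ 6 hnd hseen']
          norm_num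
          omega
        · by_cases h5 : s = 5
          · subst h5
            have hstep : pvStepA (seen, p, f, b) row = (seen.insert c 1, p, f + 1, b) := by
              simp [pvStepA, hcid, hsts, hseen']
            have hL : pvLatest (row :: R) = (pvLatest R).insert c 5 := by
              simp [pvLatest, pvStepB, hsts, hcid]
            rw [hstep]
            obtain ⟨t, ht⟩ := ih hk' (seen.insert c 1) p (f + 1) b
            refine ⟨t, ?_⟩
            rw [ht, hL, pvTally_new _ _ _ _ 4 hnd hseen', pvTally_new _ _ _ _ 5 hnd hseen',
              pvTally_new _ _ _ _ 6 hnd hseen']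
            norm_num
            omega
          · by_cases h4 : s = 4
            · subst h4
              have hstep : pvStepA (seen, p, f, b) row = (seen.insert c 1, p + 1, f, b) := by
                simp [pvStepA, hcid, hsts, hseen']
              have hL : pvLatest (row :: R) = (pvLatest R).insert c 4 := by
                simp [pvLatest, pvStepB, hsts, hcid]
              rw [hstep]
              obtain ⟨t, ht⟩ := ih hk' (seen.insert c 1) (p + 1) f b
              refine ⟨t, ?_⟩
              rw [ht, hL, pvTally_new _ _ _ _ 4 hnd hseen', pvTally_new _ _ _ _ 5 hnd hseen',
                pvTally_new _ _ _ _ 6 hnd hseen']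
              norm_num
              omega
            · have hstep : pvStepA (seen, p, f, b) row = (seen, p, f, b) := by
                simp [pvStepA, hcid, hsts, hseen', h6, h5, h4]
              have hL : pvLatest (row :: R) = pvLatest R := by
                simp [pvLatest, pvStepB, hsts, h6, h5, h4]
              rw [hstep, hL]
              exact ih hk' seen p f b

-- ===== VERDICT (by name: the statement is the Claim_ definition above) =====
theorem calReportData_spec : Claim_equal_calReportData := by
  unfold Claim_equal_calReportData
  intro tclist _hdom hpre
  unfold Spec_calReportData
  simp only [calReportData, calReportData_alt]
  have h1 : PySem.List.pyRange (PySem.List.len tclist - 1) (-1) (-1)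
      = (PySem.List.pyRange 0 (tclist.length : Int) 1).reverse := by
    rw [PySem.List.pyRange_neg_one_eq_reverse, PySem.List.len_eq]
    norm_num
  have h2 : ((PySem.List.pyRange 0 (tclist.length : Int) 1).reverse).foldl
      (fun st i => pvStepA st (PySem.List.pyGetD tclist i []))
      ((PySem.Dict.empty : PySem.Dict Int Int), (0:Int), (0:Int), (0:Int))
      = tclist.reverse.foldl pvStepA (PySem.Dict.empty, 0, 0, 0) := by
    conv_rhs => rw [← PySem.List.map_pyGetD_pyRange_zero' tclist []]
    rw [← List.map_reverse, List.foldl_map]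
  have hk : ∀ row ∈ tclist.reverse,
      ((PySem.Dict.mk row).get? "case_id").isSome = true ∧
      ((PySem.Dict.mk row).get? "case_run_status_id").isSome = true := by
    intro row hr
    exact hpre row (List.mem_reverse.1 hr)
  obtain ⟨t, ht⟩ := pvFoldA_eq tclist.reverse hk PySem.Dict.empty 0 0 0
  rw [h1, h2, ht]
  rw [pvFoldB_eq tclist]
  simp only [pvTally_empty, PySem.List.count, zero_add]
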